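-- pv_equiv track=rewrite | github.com/allenai/PathNet | pathnet/pathfinder/util.py | remove_overlapping_ents
-- ===== SOURCE A (Python) =====
-- from typing import List, Dict, Any, Tuple
--
-- def remove_overlapping_ents(he_loc_dict: Dict,
--                             ent_list: List[Tuple[int, str]]) -> List[Tuple[int, str]]:
--     """
--     remove the overlapping entities (potential duplicates)
--     :param he_loc_dict:
--     :param ent_list:
--     :return:
--     """
--
--     def is_present(idx: int, spans: List[Tuple[int, int]]):
--         for sp in spans:
--             if idx in range(sp[0], sp[1]):
--                 return True
--         return False
--
--     he_span_dict = {}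
--     for key in list(he_loc_dict.keys()):
--         # exclusive end
--         he_span_dict[key] = [(he_loc_dict[key][i],
--                               he_loc_dict[key][i] + len(key.split(' ')))
--                              for i in range(len(he_loc_dict[key]))]
--     he_all_spans = sum(he_span_dict.values(), [])
--     ent_list_spans = [(e[0], e[0] + len(e[1].split(' ')), e[1]) for e in ent_list]
--     new_ent_list = []
--     for eidx, e in enumerate(ent_list_spans):
--         if is_present(e[0], he_all_spans) or is_present(e[1], he_all_spans):
--             continue
--         else:
--             new_ent_list.append((e[0], e[2]))
--     return new_ent_list
-- ===== SOURCE B (Python) =====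
-- from bisect import bisect_right
-- from typing import List, Dict, Tuple
--
--
-- def remove_overlapping_ents(he_loc_dict: Dict,
--                             ent_list: List[Tuple[int, str]]) -> List[Tuple[int, str]]:
--     # Collect all covered half-open spans, merge them into disjoint sorted
--     # intervals, then test each entity endpoint by binary search.
--     spans = []
--     for key, locs in he_loc_dict.items():
--         k = len(key.split(' '))
--         spans.extend((s, s + k) for s in locs)
--     spans.sort(key=lambda p: p[0])
--     merged = []
--     for s, e in spans:
--         if merged and s <= merged[-1][1]:
--             if e > merged[-1][1]:
--                 merged[-1] = (merged[-1][0], e)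
--         else:
--             merged.append((s, e))
--     starts = [p[0] for p in merged]
--
--     def covered(x):
--         i = bisect_right(starts, x)
--         return i > 0 and x < merged[i - 1][1]
--
--     out = []
--     for pos, name in ent_list:
--         t = pos + len(name.split(' '))
--         if not covered(pos) and not covered(t):
--             out.append((pos, name))
--     return out
-- ===== Notes on version B (the rewrite author's own statement) =====
-- stated objective: faster
-- what changed: Instead of scanning every covered span linearly for each entity endpoint, B collects all (start, start+wordcount) spans once, sorts and merges them into disjoint intervals, and tests each endpoint by bisect_right binary search.
import Mathlib
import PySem

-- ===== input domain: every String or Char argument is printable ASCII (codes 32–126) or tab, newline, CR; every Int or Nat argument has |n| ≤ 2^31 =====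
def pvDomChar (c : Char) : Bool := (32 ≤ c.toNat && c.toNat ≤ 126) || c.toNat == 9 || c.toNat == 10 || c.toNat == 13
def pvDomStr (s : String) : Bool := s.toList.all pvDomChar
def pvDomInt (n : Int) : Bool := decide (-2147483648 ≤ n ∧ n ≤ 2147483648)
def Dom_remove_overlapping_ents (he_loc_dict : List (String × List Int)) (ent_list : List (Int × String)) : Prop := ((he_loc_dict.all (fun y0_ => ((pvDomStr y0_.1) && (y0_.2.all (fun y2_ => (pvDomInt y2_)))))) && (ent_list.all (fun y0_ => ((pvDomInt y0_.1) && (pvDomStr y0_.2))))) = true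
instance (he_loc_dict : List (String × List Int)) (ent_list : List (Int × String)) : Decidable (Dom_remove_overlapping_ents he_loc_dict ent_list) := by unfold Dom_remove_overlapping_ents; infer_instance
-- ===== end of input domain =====

-- B replaces A's per-entity linear scan over all spans by sort-merge of the spans into
-- disjoint intervals queried by binary search (bisect_right); objective: faster.


-- ===== PORT A =====
-- len(key.split(' ')): sep " " is nonempty so split? is always some
def pvWcA (s : String) : Int := PySem.List.len ((PySem.Str.split? s " ").getD [])

-- dict lookup on the association list (first match; keys come from the dict so always present)
def pvLookupA (d : List (String × List Int)) (k : String) : List Int :=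
  (((d.find? (fun p => p.1 == k)).map (fun p => p.2)).getD [])

-- A's is_present: linear scan with early return; 'idx in range(a, b)' is exactly a ≤ idx < b (step 1)
def pvIsPresent (idx : Int) : List (Int × Int) → Bool
  | [] => false
  | sp :: rest => if sp.1 ≤ idx ∧ idx < sp.2 then true else pvIsPresent idx rest

def remove_overlapping_ents (he_loc_dict : List (String × List Int)) (ent_list : List (Int × String)) : List (Int × String) :=
  -- for key in list(he_loc_dict.keys()): he_span_dict[key] = [...]
  let keys := PySem.List.dedup (he_loc_dict.map Prod.fst)
  let he_span_dict : PySem.Dict String (List (Int × Int)) :=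
    keys.foldl (fun d key =>
      d.insert key ((PySem.List.pyRange 0 (PySem.List.len (pvLookupA he_loc_dict key)) 1).map
        (fun i => (PySem.List.pyGetD (pvLookupA he_loc_dict key) i 0,
                   PySem.List.pyGetD (pvLookupA he_loc_dict key) i 0 + pvWcA key)))) PySem.Dict.empty
  -- he_all_spans = sum(he_span_dict.values(), [])
  let he_all_spans := (PySem.Dict.values he_span_dict).foldl (fun acc v => acc ++ v) []
  let ent_list_spans := ent_list.map (fun e => (e.1, e.1 + pvWcA e.2, e.2))
  (PySem.List.enumerate ent_list_spans 0).foldl (fun acc pe =>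
    if pvIsPresent pe.2.1 he_all_spans || pvIsPresent pe.2.2.1 he_all_spans then acc
    else acc ++ [(pe.2.1, pe.2.2.2)]) []

-- ===== PORT B =====
-- len(key.split(' ')): sep " " is nonempty so split? is always some
def pvWcB (s : String) : Int := PySem.List.len ((PySem.Str.split? s " ").getD [])

-- he_loc_dict.items() on the association list (distinct keys in order, first-match values)
def pvItemsB (d : List (String × List Int)) : List (String × List Int) :=
  (PySem.List.dedup (d.map Prod.fst)).map (fun k =>
    (k, (((d.find? (fun p => p.1 == k)).map (fun p => p.2)).getD [])))

-- one iteration of B's merge loop over the sorted spans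
def pvMergeStep (acc : List (Int × Int)) (p : Int × Int) : List (Int × Int) :=
  match acc.getLast? with
  | none => acc ++ [p]
  | some last =>
      if p.1 ≤ last.2 then
        (if last.2 < p.2 then acc.dropLast ++ [(last.1, p.2)] else acc)
      else acc ++ [p]

-- B's covered(x): bisect_right into the merged starts, then test the candidate interval
def pvCovered (starts : List Int) (merged : List (Int × Int)) (x : Int) : Bool :=
  let i := PySem.List.bisectRight starts x
  decide (0 < i) && decide (x < (merged.getD (i - 1) (0, 0)).2)

def remove_overlapping_ents_alt (he_loc_dict : List (String × List Int)) (ent_list : List (Int × String)) : List (Int × String) :=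
  let spans := (pvItemsB he_loc_dict).foldl
    (fun acc kv => acc ++ kv.2.map (fun s => (s, s + pvWcB kv.1))) []
  let merged := (PySem.List.sorted spans (fun p => p.1) false).foldl pvMergeStep []
  let starts := merged.map (fun p => p.1)
  ent_list.foldl (fun acc e =>
    if !pvCovered starts merged e.1 && !pvCovered starts merged (e.1 + pvWcB e.2) then acc ++ [e]
    else acc) []

-- ===== PRECONDITION & SPEC =====
def Spec_remove_overlapping_ents (he_loc_dict : List (String × List Int)) (ent_list : List (Int × String)) (out : List (Int × String)) : Prop := out = remove_overlapping_ents_alt he_loc_dict ent_list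
instance (he_loc_dict : List (String × List Int)) (ent_list : List (Int × String)) (out : List (Int × String)) : Decidable (Spec_remove_overlapping_ents he_loc_dict ent_list out) := by unfold Spec_remove_overlapping_ents; infer_instance

-- ===== CLAIM (what is proved, stated in full; the proofs are below) =====
def Claim_equal_remove_overlapping_ents : Prop := ∀ (he_loc_dict : List (String × List Int)) (ent_list : List (Int × String)), Dom_remove_overlapping_ents he_loc_dict ent_list → Spec_remove_overlapping_ents he_loc_dict ent_list (remove_overlapping_ents he_loc_dict ent_list)

-- ===== LEMMAS AND PROOFS =====

-- x lies in one of the (half-open) spans of m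
def pvCovers (m : List (Int × Int)) (x : Int) : Prop := ∃ p ∈ m, p.1 ≤ x ∧ x < p.2

-- invariant of B's merged list: intervals with nonneg width, ordered and disjoint
def pvInv (m : List (Int × Int)) : Prop :=
  (∀ p ∈ m, p.1 ≤ p.2) ∧ m.Pairwise (fun a b => a.2 < b.1)

theorem pvCovers_append_singleton (l : List (Int × Int)) (q : Int × Int) (x : Int) :
    pvCovers (l ++ [q]) x ↔ pvCovers l x ∨ (q.1 ≤ x ∧ x < q.2) := by
  constructor
  · rintro ⟨p, hm, hx⟩
    rcases List.mem_append.mp hm with h | h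
    · exact Or.inl ⟨p, h, hx⟩
    · simp at h; subst h; exact Or.inr hx
  · rintro (⟨p, hm, hx⟩ | hx)
    · exact ⟨p, List.mem_append_left _ hm, hx⟩
    · exact ⟨q, List.mem_append_right _ (by simp), hx⟩

theorem pvCovers_cons (q : Int × Int) (l : List (Int × Int)) (x : Int) :
    pvCovers (q :: l) x ↔ (q.1 ≤ x ∧ x < q.2) ∨ pvCovers l x := by
  constructor
  · rintro ⟨p, hm, hx⟩
    rcases List.mem_cons.mp hm with h | h
    · subst h; exact Or.inl hx
    · exact Or.inr ⟨p, h, hx⟩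
  · rintro (hx | ⟨p, hm, hx⟩)
    · exact ⟨q, List.mem_cons_self, hx⟩
    · exact ⟨p, List.mem_cons_of_mem _ hm, hx⟩

theorem pvIsPresent_iff (x : Int) (l : List (Int × Int)) :
    pvIsPresent x l = true ↔ pvCovers l x := by
  induction l with
  | nil => simp [pvIsPresent, pvCovers]
  | cons sp rest ih =>
    rw [pvIsPresent, pvCovers_cons]
    split_ifs with h
    · simp [h]
    · simp only [ih]; tauto

theorem pvMergeStep_inv (acc : List (Int × Int)) (p : Int × Int)
    (hInv : pvInv acc) (hp : p.1 ≤ p.2)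
    (hlast : ∀ q, acc.getLast? = some q → q.1 ≤ p.1) :
    pvInv (pvMergeStep acc p) ∧
    (∀ x, pvCovers (pvMergeStep acc p) x ↔ pvCovers acc x ∨ (p.1 ≤ x ∧ x < p.2)) ∧
    (∀ q', (pvMergeStep acc p).getLast? = some q' → q'.1 ≤ p.1) := by
  obtain ⟨hle, hpw⟩ := hInv
  unfold pvMergeStep
  cases hacc : acc.getLast? with
  | none =>
    have hnil : acc = [] := List.getLast?_eq_none_iff.mp hacc
    subst hnil
    refine ⟨⟨by simpa using hp, by simp⟩, ?_, ?_⟩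
    · intro x; simp [pvCovers]
    · intro q' hq'; simp at hq'; subst hq'; exact le_refl _
  | some last =>
    have hdec : acc.dropLast ++ [last] = acc := List.dropLast_append_getLast? last hacc
    have hlp : last.1 ≤ p.1 := hlast last hacc
    have hll : last.1 ≤ last.2 := hle last (List.mem_of_getLast? hacc)
    have hdl : ∀ q ∈ acc.dropLast, q.2 < last.1 := by
      intro q hq
      have h := (List.pairwise_append.mp (hdec ▸ hpw))
      exact h.2.2 q hq last (by simp)
    have hdlmem : ∀ q ∈ acc.dropLast, q ∈ acc := fun q hq => List.mem_of_mem_dropLast hq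
    have hpwdl : acc.dropLast.Pairwise (fun a b => a.2 < b.1) :=
      (List.pairwise_append.mp (hdec ▸ hpw)).1
    have hcov : ∀ x, pvCovers acc x ↔ pvCovers acc.dropLast x ∨ (last.1 ≤ x ∧ x < last.2) := by
      intro x; conv_lhs => rw [← hdec, pvCovers_append_singleton]
    by_cases h1 : p.1 ≤ last.2
    · by_cases h2 : last.2 < p.2
      · simp only [h1, h2, if_true]
        refine ⟨⟨?_, ?_⟩, ?_, ?_⟩
        · intro q hq
          rcases List.mem_append.mp hq with h | h
          · exact hle q (hdlmem q h)
          · simp at h; subst h; simp; omega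
        · rw [List.pairwise_append]
          refine ⟨hpwdl, by simp, ?_⟩
          intro a ha b hb; simp at hb; subst hb; exact hdl a ha
        · intro x
          rw [pvCovers_append_singleton, hcov x]
          constructor
          · rintro (h | h)
            · exact Or.inl (Or.inl h)
            · simp at h; by_cases hx : x < last.2
              · exact Or.inl (Or.inr ⟨h.1, hx⟩)
              · exact Or.inr ⟨by omega, h.2⟩
          · rintro ((h | h) | h)
            · exact Or.inl h
            · exact Or.inr ⟨h.1, by omega⟩
            · exact Or.inr ⟨by omega, h.2⟩
        · intro q' hq'; simp at hq'; subst hq'; exact hlp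
      · simp only [h1, h2, if_true, if_false]
        refine ⟨⟨hle, hpw⟩, ?_, ?_⟩
        · intro x
          rw [hcov x]
          constructor
          · rintro (h | h)
            · exact Or.inl (Or.inl h)
            · exact Or.inl (Or.inr h)
          · rintro ((h | h) | h)
            · exact Or.inl h
            · exact Or.inr h
            · exact Or.inr ⟨by omega, by omega⟩
        · intro q' hq'; rw [hacc] at hq'; simp at hq'; subst hq'; exact hlp
    · simp only [h1, if_false]
      have hall : ∀ q ∈ acc, q.2 < p.1 := by
        intro q hq
        rcases (by rw [← hdec] at hq; exact List.mem_append.mp hq) with h | h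
        · have := hdl q h; omega
        · simp at h; subst h; omega
      refine ⟨⟨?_, ?_⟩, ?_, ?_⟩
      · intro q hq
        rcases List.mem_append.mp hq with h | h
        · exact hle q h
        · simp at h; subst h; exact hp
      · rw [List.pairwise_append]
        refine ⟨hpw, by simp, ?_⟩
        intro a ha b hb; simp at hb; subst hb; exact hall a ha
      · intro x; exact pvCovers_append_singleton acc p x
      · intro q' hq'; simp at hq'; subst hq'; exact le_refl _

theorem pvMergeFold (l : List (Int × Int)) (acc : List (Int × Int))
    (hInv : pvInv acc) (hl : ∀ p ∈ l, p.1 ≤ p.2)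
    (hsort : l.Pairwise (fun a b => a.1 ≤ b.1))
    (hlast : ∀ p ∈ l, ∀ q, acc.getLast? = some q → q.1 ≤ p.1) :
    pvInv (l.foldl pvMergeStep acc) ∧
    (∀ x, pvCovers (l.foldl pvMergeStep acc) x ↔ pvCovers acc x ∨ pvCovers l x) := by
  induction l generalizing acc with
  | nil => exact ⟨hInv, fun x => by simp [pvCovers]⟩
  | cons p t ih =>
    obtain ⟨hi, hc, hq⟩ := pvMergeStep_inv acc p hInv (hl p List.mem_cons_self)
      (fun q hq => hlast p List.mem_cons_self q hq)
    obtain ⟨hs1, hs2⟩ := List.pairwise_cons.mp hsort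
    have hrec := ih (pvMergeStep acc p) hi (fun q hq' => hl q (List.mem_cons_of_mem _ hq')) hs2
      (fun p' hp' q hq'' => le_trans (hq q hq'') (hs1 p' hp'))
    refine ⟨hrec.1, fun x => ?_⟩
    rw [List.foldl_cons] at *
    rw [hrec.2 x, hc x, pvCovers_cons]
    tauto

theorem pvCovered_iff (m : List (Int × Int)) (hInv : pvInv m) (x : Int) :
    pvCovered (m.map (fun p => p.1)) m x = true ↔ pvCovers m x := by
  obtain ⟨hle, hpw⟩ := hInv
  have hsorted : (m.map (fun p => p.1)).Pairwise (· ≤ ·) := by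
    rw [List.pairwise_map]
    exact hpw.imp_of_mem (fun {a b} ha hb hr => le_trans (hle a ha) (le_of_lt hr))
  obtain ⟨hilen, hlow, hhigh⟩ := PySem.List.bisectRight_spec (m.map (fun p => p.1)) x hsorted
  set i := PySem.List.bisectRight (m.map (fun p => p.1)) x with hi
  have hmlen : (m.map (fun p => p.1)).length = m.length := by simp
  rw [hmlen] at hilen
  have hcovb : pvCovered (m.map (fun p => p.1)) m x = true ↔
      (0 < i ∧ x < (m.getD (i - 1) (0, 0)).2) := by
    simp [pvCovered, ← hi]
  rw [hcovb]
  constructor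
  · rintro ⟨hpos, hx⟩
    have hlt : i - 1 < m.length := by omega
    refine ⟨m[i - 1], List.getElem_mem hlt, ?_, ?_⟩
    · have := hlow (i - 1) (by omega) (by omega)
      rwa [List.getElem_map] at this
    · rwa [List.getD_eq_getElem m (0, 0) hlt] at hx
  · rintro ⟨p, hm, hx1, hx2⟩
    obtain ⟨j, hj, hpj⟩ := List.mem_iff_getElem.mp hm
    have hji : j < i := by
      by_contra hcon
      have := hhigh j (by omega) (by omega)
      rw [List.getElem_map, hpj] at this
      omega
    have hjeq : j = i - 1 := by
      by_contra hcon
      have hj1 : j + 1 < m.length := by omega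
      have hst : (m.map (fun p => p.1))[j + 1] ≤ x := hlow (j + 1) (by omega) (by omega)
      rw [List.getElem_map] at hst
      have hadj : m[j].2 < m[j + 1].1 :=
        List.pairwise_iff_getElem.mp hpw j (j + 1) (by omega) hj1 (by omega)
      rw [hpj] at hadj
      omega
    refine ⟨by omega, ?_⟩
    subst hjeq
    rw [List.getD_eq_getElem m (0, 0) hj, hpj]
    exact hx2

-- the comprehension '[(v[i], v[i] + c) for i in range(len(v))]' is the plain map over v
theorem pvComprehension_eq (l : List Int) (c : Int) :
    (PySem.List.pyRange 0 (PySem.List.len l) 1).map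
      (fun i => (PySem.List.pyGetD l i 0, PySem.List.pyGetD l i 0 + c)) =
    l.map (fun s => (s, s + c)) := by
  conv_rhs => rw [← PySem.List.map_pyGetD_pyRange_zero l 0]
  rw [List.map_map]
  rfl

-- the two ports build the same flat list of spans
theorem pvSpans_eq (d : List (String × List Int)) :
    (PySem.Dict.values
      ((PySem.List.dedup (d.map Prod.fst)).foldl (fun dd key =>
        dd.insert key ((PySem.List.pyRange 0 (PySem.List.len (pvLookupA d key)) 1).map
          (fun i => (PySem.List.pyGetD (pvLookupA d key) i 0,
                     PySem.List.pyGetD (pvLookupA d key) i 0 + pvWcA key)))) PySem.Dict.empty)).foldl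
      (fun acc v => acc ++ v) [] =
    (pvItemsB d).foldl (fun acc kv => acc ++ kv.2.map (fun s => (s, s + pvWcB kv.1))) [] := by
  have hitems := PySem.Dict.items_foldl_insert_fresh (PySem.List.dedup (d.map Prod.fst))
    (fun key => key)
    (fun key => (PySem.List.pyRange 0 (PySem.List.len (pvLookupA d key)) 1).map
      (fun i => (PySem.List.pyGetD (pvLookupA d key) i 0,
                 PySem.List.pyGetD (pvLookupA d key) i 0 + pvWcA key)))
    PySem.Dict.empty (by intro a _; simp) (by simpa using PySem.List.nodup_dedup (d.map Prod.fst))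
  rw [PySem.Dict.values, hitems]
  have hemp : (PySem.Dict.empty : PySem.Dict String (List (Int × Int))).items = [] := rfl
  rw [hemp, List.nil_append, List.map_map]
  rw [PySem.List.foldl_append_eq_flatten, PySem.List.foldl_append_eq_flatMap, pvItemsB]
  rw [List.nil_append, List.nil_append]
  conv_rhs => rw [List.flatMap_def]
  rw [List.map_map]
  congr 1
  apply List.map_congr_left
  intro key _
  simp only [Function.comp_apply]
  rw [pvComprehension_eq]
  rfl

-- both output loops are the same filter once the membership tests agree pointwise
theorem pvFoldOut (S : List (Int × Int)) (starts : List Int) (merged : List (Int × Int))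
    (hpt : ∀ x, pvIsPresent x S = pvCovered starts merged x)
    (ents : List (Int × String)) :
    ∀ (n : Int) (acc : List (Int × String)),
    (PySem.List.enumerate (ents.map (fun e => (e.1, e.1 + pvWcA e.2, e.2))) n).foldl
      (fun acc pe => if pvIsPresent pe.2.1 S || pvIsPresent pe.2.2.1 S then acc
        else acc ++ [(pe.2.1, pe.2.2.2)]) acc =
    ents.foldl (fun acc e =>
      if !pvCovered starts merged e.1 && !pvCovered starts merged (e.1 + pvWcB e.2) then acc ++ [e]
      else acc) acc := by
  induction ents with
  | nil => intro n acc; simp [PySem.List.enumerate_nil]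
  | cons e t ih =>
    intro n acc
    rw [List.map_cons, PySem.List.enumerate_cons, List.foldl_cons, List.foldl_cons]
    rw [ih (n + 1)]
    congr 1
    simp only [hpt]
    have hwc : pvWcA e.2 = pvWcB e.2 := rfl
    rw [hwc]
    cases pvCovered starts merged e.1 <;> cases pvCovered starts merged (e.1 + pvWcB e.2) <;> simp

-- every span has nonnegative width (its width is a list length)
theorem pvSpans_wd (d : List (String × List Int)) :
    ∀ p ∈ (pvItemsB d).foldl (fun acc kv => acc ++ kv.2.map (fun s => (s, s + pvWcB kv.1))) [],
      p.1 ≤ p.2 := by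
  intro p hp
  rw [PySem.List.foldl_append_eq_flatMap, List.nil_append] at hp
  obtain ⟨kv, _, hp2⟩ := List.mem_flatMap.mp hp
  obtain ⟨s, _, rfl⟩ := List.mem_map.mp hp2
  have : (0 : Int) ≤ pvWcB kv.1 := by
    rw [pvWcB, PySem.List.len_eq]; exact Int.natCast_nonneg _
  omega

-- ===== VERDICT (by name: the statement is the Claim_ definition above) =====
set_option maxHeartbeats 1000000 in
theorem remove_overlapping_ents_spec : Claim_equal_remove_overlapping_ents := by
  unfold Claim_equal_remove_overlapping_ents Spec_remove_overlapping_ents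
  intro d ents _
  simp only [remove_overlapping_ents, remove_overlapping_ents_alt]
  rw [pvSpans_eq d]
  set S := (pvItemsB d).foldl (fun acc kv => acc ++ kv.2.map (fun s => (s, s + pvWcB kv.1))) []
    with hSdef
  set sortedS := PySem.List.sorted S (fun p => p.1) false with hsortdef
  set merged := sortedS.foldl pvMergeStep [] with hmdef
  have hwd : ∀ p ∈ sortedS, p.1 ≤ p.2 := by
    intro p hp
    exact pvSpans_wd d p ((PySem.List.mem_sorted S (fun p => p.1) false p).mp hp)
  have hsort : sortedS.Pairwise (fun a b => a.1 ≤ b.1) := PySem.List.sorted_pairwise S _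
  obtain ⟨hInvM, hcovM⟩ := pvMergeFold sortedS [] ⟨by simp, by simp⟩ hwd hsort
    (by intro p _ q hq; simp at hq)
  have hpt : ∀ x, pvIsPresent x S = pvCovered (merged.map (fun p => p.1)) merged x := by
    intro x
    rw [Bool.eq_iff_iff, pvIsPresent_iff, pvCovered_iff merged hInvM, hcovM]
    have hmem : ∀ p, p ∈ sortedS ↔ p ∈ S := fun p => PySem.List.mem_sorted S (fun p => p.1) false p
    constructor
    · rintro ⟨p, hm, hx⟩; exact Or.inr ⟨p, (hmem p).mpr hm, hx⟩
    · rintro (h | ⟨p, hm, hx⟩)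
      · exact absurd h (by simp [pvCovers])
      · exact ⟨p, (hmem p).mp hm, hx⟩
  exact pvFoldOut S (merged.map (fun p => p.1)) merged hpt ents 0 []
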